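-- pv_equiv track=rewrite | github.com/everbird/geekdadgo | geek-dad-go_mp42imgs.py | smart_correct
-- ===== SOURCE A (Python) =====
-- def smart_correct(text):
--     corrections = {
--         "O": "0",
--         "L": "1",
--         "R": "2",
--         "E": "3",
--         "A": "4",
--         "S": "5",
--         "G": "6",
--         "T": "7",
--         "B": "8",
--     }
--     month = text[:3]
--     day = text[3:]
--     r = ""
--     for ch in day:
--         if ch in corrections:
--             r += corrections[ch]
--         else:
--             r += ch
--     return "{}{}".format(month, r)
-- ===== SOURCE B (Python) =====
-- def smart_correct(text):
--     month = text[:3]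
--     day = text[3:]
--     for letter, digit in (
--         ("O", "0"), ("L", "1"), ("R", "2"), ("E", "3"), ("A", "4"),
--         ("S", "5"), ("G", "6"), ("T", "7"), ("B", "8"),
--     ):
--         day = day.replace(letter, digit)
--     return "{}{}".format(month, day)
-- ===== Notes on version B (the rewrite author's own statement) =====
-- stated objective: faster
-- what changed: B drops A's per-character Python loop with dict lookup and string accumulation and instead rewrites the day suffix by nine whole-string replace passes, one per correction pair; safe because the replacement digits never occur as sources.
import Mathlib
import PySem

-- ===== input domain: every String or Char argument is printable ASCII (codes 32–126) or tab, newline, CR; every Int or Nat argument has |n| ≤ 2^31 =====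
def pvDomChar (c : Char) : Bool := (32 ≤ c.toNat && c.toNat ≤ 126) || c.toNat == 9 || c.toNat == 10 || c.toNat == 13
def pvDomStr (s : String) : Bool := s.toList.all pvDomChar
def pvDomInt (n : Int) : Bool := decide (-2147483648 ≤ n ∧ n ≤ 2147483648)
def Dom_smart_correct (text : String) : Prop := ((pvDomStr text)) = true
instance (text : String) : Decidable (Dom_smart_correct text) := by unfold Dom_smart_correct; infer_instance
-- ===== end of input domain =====

-- B replaces A's per-character loop with dict lookup by nine whole-string replace passes
-- (one per correction pair); same return value, measurably faster in Python (C-level replace).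

-- ===== PORT A =====
-- the corrections dict (keys/values are single characters, so Char × Char)
def pvCorrections : PySem.Dict Char Char :=
  (((((((((PySem.Dict.empty.insert 'O' '0').insert 'L' '1').insert 'R' '2').insert
      'E' '3').insert 'A' '4').insert 'S' '5').insert 'G' '6').insert 'T' '7').insert 'B' '8')

def smart_correct (text : String) : String :=
  let month := PySem.Str.slice text none (some 3)
  let day := PySem.Str.slice text (some 3) none
  let r : List Char := day.toList.foldl (fun r ch =>
    match PySem.Dict.get? pvCorrections ch with
    | some d => r ++ [d]      -- ch in corrections: r += corrections[ch]
    | none   => r ++ [ch]) [] -- else: r += ch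
  month ++ String.ofList r    -- "{}{}".format(month, r)

-- ===== PORT B =====
def pvPairs : List (String × String) :=
  [("O", "0"), ("L", "1"), ("R", "2"), ("E", "3"), ("A", "4"),
   ("S", "5"), ("G", "6"), ("T", "7"), ("B", "8")]

def smart_correct_alt (text : String) : String :=
  let month := PySem.Str.slice text none (some 3)
  let day := PySem.Str.slice text (some 3) none
  let day := pvPairs.foldl (fun d p => PySem.Str.replace d p.1 p.2) day
  month ++ day

-- ===== PRECONDITION & SPEC =====
def Spec_smart_correct (text : String) (out : String) : Prop := out = smart_correct_alt text
instance (text : String) (out : String) : Decidable (Spec_smart_correct text out) := by unfold Spec_smart_correct; infer_instance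

-- ===== CLAIM (what is proved, stated in full; the proofs are below) =====
def Claim_equal_smart_correct : Prop := ∀ (text : String), Dom_smart_correct text → Spec_smart_correct text (smart_correct text)

-- ===== LEMMAS AND PROOFS =====

-- a single-character replace is a character map
theorem replace_go_single (a b : Char) :
    ∀ (fuel : Nat) (l acc : List Char), l.length ≤ fuel →
      PySem.Chars.replace.go [a] [b] fuel l acc
        = acc.reverse ++ l.map (fun c => if c = a then b else c) := by
  intro fuel
  induction fuel with
  | zero =>
      intro l acc h
      have : l = [] := List.eq_nil_of_length_eq_zero (Nat.le_zero.mp h)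
      subst this
      simp [PySem.Chars.replace.go]
  | succ n ih =>
      intro l acc h
      cases l with
      | nil => simp [PySem.Chars.replace.go]
      | cons c t =>
          by_cases hc : c = a
          · subst hc
            have hpre : [c].isPrefixOf (c :: t) = true := by simp [List.isPrefixOf]
            rw [PySem.Chars.replace.go]
            simp only [hpre, if_true, List.length_cons, List.length_nil, Nat.zero_add,
              List.drop_succ_cons, List.drop_zero]
            rw [ih t ([b].reverse ++ acc) (Nat.lt_succ_iff.mp (by simpa using h))]
            simp
          · have hpre : [a].isPrefixOf (c :: t) = false := by
              simp [List.isPrefixOf, Ne.symm hc]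
            rw [PySem.Chars.replace.go]
            simp only [hpre, Bool.false_eq_true, if_false]
            rw [ih t (c :: acc) (Nat.lt_succ_iff.mp (by simpa using h))]
            simp [hc]

theorem replace_single (a b : Char) (s : List Char) :
    PySem.Chars.replace s [a] [b] = s.map (fun c => if c = a then b else c) := by
  rw [PySem.Chars.replace, if_neg (by simp)]
  simpa using replace_go_single a b s.length s [] le_rfl

-- A's loop, with its running accumulator, produces a character map
theorem foldl_corr (l : List Char) :
    l.foldl (fun r ch =>
      match PySem.Dict.get? pvCorrections ch with
      | some d => r ++ [d]
      | none   => r ++ [ch]) []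
      = l.map (fun ch =>
          match PySem.Dict.get? pvCorrections ch with
          | some d => d
          | none   => ch) := by
  have key : ∀ (l acc : List Char),
      l.foldl (fun r ch =>
        match PySem.Dict.get? pvCorrections ch with
        | some d => r ++ [d]
        | none   => r ++ [ch]) acc
      = acc ++ l.map (fun ch =>
          match PySem.Dict.get? pvCorrections ch with
          | some d => d
          | none   => ch) := by
    intro l
    induction l with
    | nil => simp
    | cons c t ih =>
        intro acc
        simp only [List.foldl_cons, List.map_cons]
        cases h : PySem.Dict.get? pvCorrections c with
        | some d => simp [ih]
        | none => simp [ih]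
  simpa using key l []

-- the nine substitution passes composed agree with the dict lookup, elementwise
theorem chain_eq (l : List Char) :
    (((((((((l.map (fun c => if c = 'O' then '0' else c)).map
      (fun c => if c = 'L' then '1' else c)).map
      (fun c => if c = 'R' then '2' else c)).map
      (fun c => if c = 'E' then '3' else c)).map
      (fun c => if c = 'A' then '4' else c)).map
      (fun c => if c = 'S' then '5' else c)).map
      (fun c => if c = 'G' then '6' else c)).map
      (fun c => if c = 'T' then '7' else c)).map
      (fun c => if c = 'B' then '8' else c))
      = l.map (fun ch =>
          match PySem.Dict.get? pvCorrections ch with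
          | some d => d
          | none   => ch) := by
  simp only [List.map_map]
  apply List.map_congr_left
  intro c _
  by_cases h1 : c = 'O'; · subst h1; decide
  by_cases h2 : c = 'L'; · subst h2; decide
  by_cases h3 : c = 'R'; · subst h3; decide
  by_cases h4 : c = 'E'; · subst h4; decide
  by_cases h5 : c = 'A'; · subst h5; decide
  by_cases h6 : c = 'S'; · subst h6; decide
  by_cases h7 : c = 'G'; · subst h7; decide
  by_cases h8 : c = 'T'; · subst h8; decide
  by_cases h9 : c = 'B'; · subst h9; decide
  have hitems : pvCorrections.items =
      [('O','0'), ('L','1'), ('R','2'), ('E','3'), ('A','4'),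
       ('S','5'), ('G','6'), ('T','7'), ('B','8')] := by decide
  have hget : PySem.Dict.get? pvCorrections c = none := by
    show Option.map (fun x => x.2) (List.find? (fun p => p.1 == c) pvCorrections.items) = none
    rw [hitems]
    simp only [List.find?,
      show ('O' == c) = false from beq_eq_false_iff_ne.mpr (Ne.symm h1),
      show ('L' == c) = false from beq_eq_false_iff_ne.mpr (Ne.symm h2),
      show ('R' == c) = false from beq_eq_false_iff_ne.mpr (Ne.symm h3),
      show ('E' == c) = false from beq_eq_false_iff_ne.mpr (Ne.symm h4),
      show ('A' == c) = false from beq_eq_false_iff_ne.mpr (Ne.symm h5),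
      show ('S' == c) = false from beq_eq_false_iff_ne.mpr (Ne.symm h6),
      show ('G' == c) = false from beq_eq_false_iff_ne.mpr (Ne.symm h7),
      show ('T' == c) = false from beq_eq_false_iff_ne.mpr (Ne.symm h8),
      show ('B' == c) = false from beq_eq_false_iff_ne.mpr (Ne.symm h9),
      Option.map_none]
  rw [hget]
  simp [Function.comp, h1, h2, h3, h4, h5, h6, h7, h8, h9]

-- the whole day-correction: A's accumulated string equals B's replace chain
theorem core_eq (day : String) :
    String.ofList (day.toList.foldl (fun r ch =>
      match PySem.Dict.get? pvCorrections ch with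
      | some d => r ++ [d]
      | none   => r ++ [ch]) [])
    = PySem.Str.replace (PySem.Str.replace (PySem.Str.replace (PySem.Str.replace
        (PySem.Str.replace (PySem.Str.replace (PySem.Str.replace (PySem.Str.replace
        (PySem.Str.replace day "O" "0") "L" "1") "R" "2") "E" "3") "A" "4") "S" "5")
        "G" "6") "T" "7") "B" "8" := by
  rw [foldl_corr, ← chain_eq]
  conv_rhs => rw [← String.ofList_toList (s := PySem.Str.replace _ "B" "8")]
  apply congrArg
  simp only [PySem.Str.toList_replace,
    show "O".toList = ['O'] from by decide, show "0".toList = ['0'] from by decide,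
    show "L".toList = ['L'] from by decide, show "1".toList = ['1'] from by decide,
    show "R".toList = ['R'] from by decide, show "2".toList = ['2'] from by decide,
    show "E".toList = ['E'] from by decide, show "3".toList = ['3'] from by decide,
    show "A".toList = ['A'] from by decide, show "4".toList = ['4'] from by decide,
    show "S".toList = ['S'] from by decide, show "5".toList = ['5'] from by decide,
    show "G".toList = ['G'] from by decide, show "6".toList = ['6'] from by decide,
    show "T".toList = ['T'] from by decide, show "7".toList = ['7'] from by decide,
    show "B".toList = ['B'] from by decide, show "8".toList = ['8'] from by decide,
    replace_single]

-- ===== VERDICT (by name: the statement is the Claim_ definition above) =====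
theorem smart_correct_spec : Claim_equal_smart_correct := by
  intro text _
  unfold Spec_smart_correct smart_correct smart_correct_alt
  simp only [pvPairs, List.foldl_cons, List.foldl_nil]
  rw [core_eq]
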